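-- pv_equiv track=rewrite | github.com/dth2701/Leetcode-Tracking | TIP102/Unit 2: Dictionaries/s2Standard.py | num_equiv_species_pairs
-- ===== SOURCE A (Python) =====
-- def num_equiv_species_pairs(species_pairs):
--     # Tranverse to each pair
--     counter = {}
--     for pair in species_pairs:
--         counter[tuple(pair)] = 1 + counter.get(tuple(pair), 0)
--
--     pairs = 0
--     for value in counter.values():
--         if value > 1:
--             pairs += value * (value -1) // 2 #3+0+0
--     return pairs
-- ===== SOURCE B (Python) =====
-- def num_equiv_species_pairs(species_pairs):
--     # Brute force: directly count index pairs i < j with equal rows,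
--     # comparing each row against all previously seen rows. No counter
--     # dict, no combination formula.
--     total = 0
--     prefix = []
--     for pair in species_pairs:
--         for earlier in prefix:
--             if earlier == pair:
--                 total += 1
--         prefix.append(pair)
--     return total
-- ===== Notes on version B (the rewrite author's own statement) =====
-- stated objective: alternative
-- what changed: B drops the hash counter and the C(c,2) formula entirely and counts equivalent index pairs i<j by a direct nested scan of each row against all earlier rows.
import Mathlib
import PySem

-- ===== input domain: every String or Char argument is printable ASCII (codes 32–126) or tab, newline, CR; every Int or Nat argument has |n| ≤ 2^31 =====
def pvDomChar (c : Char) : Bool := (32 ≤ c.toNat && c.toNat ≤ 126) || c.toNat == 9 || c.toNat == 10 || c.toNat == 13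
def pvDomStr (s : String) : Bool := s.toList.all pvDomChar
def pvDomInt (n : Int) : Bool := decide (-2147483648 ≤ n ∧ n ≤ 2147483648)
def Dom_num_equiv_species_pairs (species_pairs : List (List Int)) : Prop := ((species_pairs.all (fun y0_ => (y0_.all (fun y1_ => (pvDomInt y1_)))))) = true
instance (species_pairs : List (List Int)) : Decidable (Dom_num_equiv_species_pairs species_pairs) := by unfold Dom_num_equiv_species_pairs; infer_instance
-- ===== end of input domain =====

-- B drops the hash counter and the C(c,2) formula: it counts equivalent index
-- pairs i<j by a direct nested scan of each row against all earlier rows (alternative, not faster).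


-- ===== PORT A =====
-- counter[tuple(pair)] = 1 + counter.get(tuple(pair), 0); then sum value*(value-1)//2 over values > 1
def num_equiv_species_pairs (species_pairs : List (List Int)) : Int :=
  let counter := species_pairs.foldl
    (fun d pair => d.insert pair (1 + d.getD pair 0)) PySem.Dict.empty
  counter.values.foldl
    (fun pairs value =>
      if value > 1 then pairs + PySem.Int.floordiv (value * (value - 1)) 2 else pairs) 0

-- ===== PORT B =====
-- nested scan: for each pair, compare against every earlier row, then append it to the prefix
def num_equiv_species_pairs_alt (species_pairs : List (List Int)) : Int :=
  (species_pairs.foldl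
    (fun st pair =>
      (st.2.foldl (fun total earlier => if earlier = pair then total + 1 else total) st.1,
       st.2 ++ [pair]))
    ((0 : Int), ([] : List (List Int)))).1

-- ===== PRECONDITION & SPEC =====
def Spec_num_equiv_species_pairs (species_pairs : List (List Int)) (out : Int) : Prop := out = num_equiv_species_pairs_alt species_pairs
instance (species_pairs : List (List Int)) (out : Int) : Decidable (Spec_num_equiv_species_pairs species_pairs out) := by unfold Spec_num_equiv_species_pairs; infer_instance

-- ===== CLAIM (what is proved, stated in full; the proofs are below) =====
def Claim_equal_num_equiv_species_pairs : Prop := ∀ (species_pairs : List (List Int)), Dom_num_equiv_species_pairs species_pairs → Spec_num_equiv_species_pairs species_pairs (num_equiv_species_pairs species_pairs)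

-- ===== LEMMAS AND PROOFS =====

-- the per-value contribution of A's second loop
def pvF (v : Int) : Int := if v > 1 then PySem.Int.floordiv (v * (v - 1)) 2 else 0

-- the value of A's second loop on a counter dict
def pvS (d : PySem.Dict (List Int) Int) : Int := (d.values.map pvF).sum

lemma pvF_step (c : Int) (hc : 0 ≤ c) : pvF (c + 1) = pvF c + c := by
  unfold pvF
  by_cases h : c < 2
  · interval_cases c <;> simp [PySem.Int.floordiv]
  · rw [if_pos (by omega), if_pos (by omega),
      PySem.Int.floordiv_eq_ediv_of_pos (by omega), PySem.Int.floordiv_eq_ediv_of_pos (by omega)]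
    have : (c + 1) * (c + 1 - 1) = c * (c - 1) + c * 2 := by ring
    rw [this, Int.add_mul_ediv_right _ _ (by omega)]

lemma sum_map_update {α : Type} (l : List α) (g g' : α → Int) (k : α)
    (hl : l.Nodup) (hk : k ∈ l) (hne : ∀ x ∈ l, x ≠ k → g' x = g x) :
    (l.map g').sum = (l.map g).sum + g' k - g k := by
  induction l with
  | nil => cases hk
  | cons x l ih =>
    rcases List.nodup_cons.mp hl with ⟨hx, hl'⟩
    by_cases hxk : x = k
    · subst hxk
      have hmap : l.map g' = l.map g := by
        apply List.map_congr_left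
        intro y hy
        exact hne y (List.mem_cons_of_mem _ hy) (fun h => hx (h ▸ hy))
      simp [hmap]; ring
    · have hk' : k ∈ l := by
        rcases List.mem_cons.mp hk with h | h
        · exact absurd h.symm hxk
        · exact h
      have := ih hl' hk' (fun y hy hyk => hne y (List.mem_cons_of_mem _ hy) hyk)
      simp only [List.map_cons, List.sum_cons, this, hne x (List.mem_cons_self) hxk]
      ring

lemma pvS_insert (d : PySem.Dict (List Int) Int) (k : List Int) (v : Int)
    (hnd : d.keys.Nodup) :
    pvS (d.insert k v) = pvS d + pvF v - pvF (d.getD k 0) := by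
  by_cases hc : d.contains k = true
  · unfold pvS
    rw [PySem.Dict.values_eq_map_keys d hnd 0,
        PySem.Dict.values_eq_map_keys (d.insert k v) (PySem.Dict.nodup_keys_insert d k v hnd) 0,
        PySem.Dict.keys_insert_of_contains d v hc,
        List.map_map, List.map_map]
    have hk : k ∈ d.keys := (PySem.Dict.contains_iff_mem_keys d k).mp hc
    have := sum_map_update d.keys
      (fun k' => pvF (d.getD k' 0))
      (fun k' => pvF ((d.insert k v).getD k' 0)) k hnd hk
      (by intro x hx hxk
          simp [PySem.Dict.getD_insert_of_ne d v 0 hxk])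
    simpa [Function.comp, PySem.Dict.getD_insert_self] using this
  · have h0 : d.getD k 0 = 0 :=
      PySem.Dict.getD_of_not_contains d 0 (by simpa using hc)
    unfold pvS
    have hitems := PySem.Dict.items_insert_of_not_contains d v (by simpa using hc)
    simp only [PySem.Dict.values, hitems, List.map_append, List.sum_append, h0]
    simp [pvF]

-- B's inner scan over the prefix adds exactly the number of earlier equal rows
lemma inner_scan_eq_count (pair : List Int) :
    ∀ (pre : List (List Int)) (t : Int),
    pre.foldl (fun total earlier => if earlier = pair then total + 1 else total) t
      = t + (pre.count pair : Int) := by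
  intro pre
  induction pre with
  | nil => intro t; simp
  | cons x rest ih =>
    intro t
    by_cases hx : x = pair
    · simp [hx, ih]; ring
    · have : (pair == x) = false := by
        simpa [beq_iff_eq] using fun h => hx h.symm
      simp [List.foldl_cons, if_neg hx, ih, List.count_cons]

-- B's outer fold, started from any prefix whose counts A's dict records, tracks pvS of A's fold
lemma loop_eq (xs : List (List Int)) :
    ∀ (d : PySem.Dict (List Int) Int) (t : Int) (pre : List (List Int)),
    d.keys.Nodup → (∀ k, d.getD k 0 = (pre.count k : Int)) →
    (xs.foldl
      (fun st pair =>
        (st.2.foldl (fun total earlier => if earlier = pair then total + 1 else total) st.1,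
         st.2 ++ [pair])) (t, pre)).1
      = t + pvS (xs.foldl (fun d pair => d.insert pair (1 + d.getD pair 0)) d) - pvS d := by
  induction xs with
  | nil => intro d t pre _ _; simp
  | cons pair rest ih =>
    intro d t pre hnd hcnt
    simp only [List.foldl_cons]
    set c := d.getD pair 0 with hc
    have hc0 : 0 ≤ c := by rw [hc, hcnt]; positivity
    have hinner := inner_scan_eq_count pair pre t
    have hnd' : (d.insert pair (1 + c)).keys.Nodup := PySem.Dict.nodup_keys_insert d pair _ hnd
    have hcnt' : ∀ k, (d.insert pair (1 + c)).getD k 0 = ((pre ++ [pair]).count k : Int) := by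
      intro k
      by_cases hk : k = pair
      · subst hk
        rw [PySem.Dict.getD_insert_self]
        simp [List.count_append, ← hcnt, hc]; ring
      · rw [PySem.Dict.getD_insert_of_ne d _ 0 hk]
        have : ([pair].count k) = 0 := by
          simp [List.count_singleton]
          simpa [beq_iff_eq] using fun h => hk h.symm
        simp [List.count_append, this, hcnt]
    have hS : pvS (d.insert pair (1 + c)) = pvS d + c := by
      have h1 : (1 : Int) + c = c + 1 := by ring
      rw [h1, pvS_insert d pair (c + 1) hnd, pvF_step c hc0, ← hc]; ring
    have key := ih (d.insert pair (1 + c)) (t + (pre.count pair : Int)) (pre ++ [pair]) hnd' hcnt'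
    rw [hinner, key, hS]
    have hcc : c = (pre.count pair : Int) := hc.trans (hcnt pair)
    rw [hcc]; ring

lemma second_loop_eq_pvS (d : PySem.Dict (List Int) Int) :
    d.values.foldl
      (fun pairs value =>
        if value > 1 then pairs + PySem.Int.floordiv (value * (value - 1)) 2 else pairs) 0
    = pvS d := by
  have hstep : (fun (pairs value : Int) =>
      if value > 1 then pairs + PySem.Int.floordiv (value * (value - 1)) 2 else pairs)
      = fun pairs value => pairs + pvF value := by
    funext p v
    unfold pvF
    split <;> simp
  rw [hstep, PySem.List.foldl_add]
  unfold pvS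
  ring

-- ===== VERDICT (by name: the statement is the Claim_ definition above) =====
theorem num_equiv_species_pairs_spec : Claim_equal_num_equiv_species_pairs := by
  intro xs _
  unfold Spec_num_equiv_species_pairs num_equiv_species_pairs num_equiv_species_pairs_alt
  rw [loop_eq xs PySem.Dict.empty 0 [] (by simp) (by intro k; simp [PySem.Dict.getD_empty])]
  simp only [second_loop_eq_pvS]
  have : pvS PySem.Dict.empty = 0 := rfl
  rw [this]; ring
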